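-- pv_equiv track=rewrite | github.com/Randdalf/aoc19 | d22.py | flattened
-- ===== SOURCE A (Python) =====
-- class TECHNIQUE:
--     CUT = 'cut'
--     DEAL = 'deal with increment'
--     REVERSE = 'deal into new stack'
--
-- def mod_inverse(a, n):
--     s = 0
--     old_s = 1
--     r = n
--     old_r = a
--     while r != 0:
--         q = old_r // r
--         old_r, r = r, old_r - q * r
--         old_s, s = s, old_s - q * s
--     return old_s % n
--
-- def flattened(commands, n):
--     coeff = 1
--     shift = 0
--     for command in reversed(commands):
--         if command[0] == TECHNIQUE.REVERSE:
--             shift = n - 1 - shift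
--             coeff *= -1
--         elif command[0] == TECHNIQUE.CUT:
--             shift += n + command[1] if command[1] < 0 else command[1]
--         elif command[0] == TECHNIQUE.DEAL:
--             inv = mod_inverse(command[1], n)
--             shift *= inv
--             coeff *= inv
--     return coeff % n, shift % n
-- ===== SOURCE B (Python) =====
-- class TECHNIQUE:
--     CUT = 'cut'
--     DEAL = 'deal with increment'
--     REVERSE = 'deal into new stack'
--
-- def bezout(a, b):
--     # recursive extended Euclid: returns (x, y) with a*x + b*y = gcd(a, b)
--     if b == 0:
--         return (1, 0)
--     x, y = bezout(b, a % b)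
--     return (y, x - (a // b) * y)
--
-- def mod_inverse(a, n):
--     return bezout(a, n)[0] % n
--
-- def flattened(commands, n):
--     # forward pass: map each command to the affine pair (a, b) of its inverse
--     # and compose it on the inner side of the accumulated map coeff*x + shift
--     coeff, shift = 1, 0
--     for command in commands:
--         match command:
--             case (TECHNIQUE.REVERSE, _):
--                 a, b = -1, n - 1
--             case (TECHNIQUE.CUT, c):
--                 a, b = 1, (n + c if c < 0 else c)
--             case (TECHNIQUE.DEAL, m):
--                 a, b = mod_inverse(m, n), 0
--             case _:
--                 a, b = 1, 0
--         coeff, shift = coeff * a, coeff * b + shift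
--     return coeff % n, shift % n
-- ===== Notes on version B (the rewrite author's own statement) =====
-- stated objective: alternative
-- what changed: B replaces A's iterative extended Euclid with a recursive bezout helper and replaces A's reversed-order fold (which composes each technique on the outer side, rescaling both coeff and shift) by a forward pass that first maps each command to its inverse's affine pair (a,b) and composes it on the inner side of the accumulated coeff*x+shift map.
-- outside the precondition, e.g. on flattened([('cut', 1)], 0): A raises ZeroDivisionError, B raises ZeroDivisionError
import Mathlib
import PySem

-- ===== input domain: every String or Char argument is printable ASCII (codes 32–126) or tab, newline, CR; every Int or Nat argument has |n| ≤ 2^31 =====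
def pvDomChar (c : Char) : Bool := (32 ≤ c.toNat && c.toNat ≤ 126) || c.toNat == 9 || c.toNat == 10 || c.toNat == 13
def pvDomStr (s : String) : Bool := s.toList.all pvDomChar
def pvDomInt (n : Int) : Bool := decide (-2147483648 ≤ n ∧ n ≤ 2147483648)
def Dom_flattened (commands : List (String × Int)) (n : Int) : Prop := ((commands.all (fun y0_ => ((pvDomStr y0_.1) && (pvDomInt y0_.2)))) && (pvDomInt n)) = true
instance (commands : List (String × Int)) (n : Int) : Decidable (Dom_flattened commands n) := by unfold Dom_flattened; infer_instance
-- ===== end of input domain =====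

-- B maps each command to its inverse's affine pair (via a recursive extended
-- Euclid instead of A's iterative loop) and composes forward on the inner side
-- (alternative decomposition, same cost); return value only, no mutation.

-- ===== PORT A =====
-- the while loop of A's mod_inverse; terminates because |r| strictly decreases
def modInvLoop (r old_r s old_s : Int) : Int :=
  if hr : r = 0 then old_s
  else
    modInvLoop (old_r - PySem.Int.floordiv old_r r * r) r
               (old_s - PySem.Int.floordiv old_r r * s) s
termination_by r.natAbs
decreasing_by
  have h := PySem.Int.floordiv_mul_add_mod old_r r
  have hm : old_r - PySem.Int.floordiv old_r r * r = PySem.Int.mod old_r r := by omega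
  rw [hm]
  rcases lt_trichotomy r 0 with hneg | hz | hpos
  · have := PySem.Int.mod_neg_bounds (a := old_r) hneg; omega
  · exact absurd hz hr
  · have h1 := PySem.Int.mod_nonneg (a := old_r) hpos
    have h2 := PySem.Int.mod_lt (a := old_r) hpos
    omega

def modInverse (a n : Int) : Int := PySem.Int.mod (modInvLoop n a 0 1) n

-- A's loop body: for command in reversed(commands), state (coeff, shift)
def stepA (n : Int) (st : Int × Int) (command : String × Int) : Int × Int :=
  if command.1 = "deal into new stack" then
    (st.1 * (-1), n - 1 - st.2)
  else if command.1 = "cut" then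
    (st.1, st.2 + (if command.2 < 0 then n + command.2 else command.2))
  else if command.1 = "deal with increment" then
    (st.1 * modInverse command.2 n, st.2 * modInverse command.2 n)
  else st

def flattened (commands : List (String × Int)) (n : Int) : Int × Int :=
  let st := commands.reverse.foldl (stepA n) (1, 0)
  (PySem.Int.mod st.1 n, PySem.Int.mod st.2 n)

-- ===== PORT B =====
-- recursive extended Euclid: (x, y) with a*x + b*y = gcd(a, b)
def bezout (a b : Int) : Int × Int :=
  if hb : b = 0 then (1, 0)
  else
    let p := bezout b (PySem.Int.mod a b)
    (p.2, p.1 - PySem.Int.floordiv a b * p.2)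
termination_by b.natAbs
decreasing_by
  rcases lt_trichotomy b 0 with hneg | hz | hpos
  · have := PySem.Int.mod_neg_bounds (a := a) hneg; omega
  · exact absurd hz hb
  · have h1 := PySem.Int.mod_nonneg (a := a) hpos
    have h2 := PySem.Int.mod_lt (a := a) hpos
    omega

def modInverseB (a n : Int) : Int := PySem.Int.mod (bezout a n).1 n

-- the affine pair (a, b) of one command's inverse
def affB (n : Int) (command : String × Int) : Int × Int :=
  match command with
  | ("deal into new stack", _) => (-1, n - 1)
  | ("cut", c) => (1, if c < 0 then n + c else c)
  | ("deal with increment", m) => (modInverseB m n, 0)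
  | _ => (1, 0)

def flattened_alt (commands : List (String × Int)) (n : Int) : Int × Int :=
  let st := commands.foldl
    (fun st command =>
      let p := affB n command
      (st.1 * p.1, st.1 * p.2 + st.2)) (1, 0)
  (PySem.Int.mod st.1 n, PySem.Int.mod st.2 n)

-- ===== PRECONDITION & SPEC =====
-- Pre_ excludes n = 0, on which Python's final '% n' raises ZeroDivisionError
def Pre_flattened (commands : List (String × Int)) (n : Int) : Prop := n ≠ 0
instance (commands : List (String × Int)) (n : Int) : Decidable (Pre_flattened commands n) := by unfold Pre_flattened; infer_instance
def pvWitness_flattened : (List (String × Int)) × Int := ([("cut", 3), ("deal with increment", 7), ("deal into new stack", 0)], 10)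

def Spec_flattened (commands : List (String × Int)) (n : Int) (out : Int × Int) : Prop := out = flattened_alt commands n
instance (commands : List (String × Int)) (n : Int) (out : Int × Int) : Decidable (Spec_flattened commands n out) := by unfold Spec_flattened; infer_instance

-- ===== CLAIM (what is proved, stated in full; the proofs are below) =====
def Claim_equal_flattened : Prop := ∀ (commands : List (String × Int)) (n : Int), Dom_flattened commands n → Pre_flattened commands n → Spec_flattened commands n (flattened commands n)

-- ===== LEMMAS AND PROOFS =====

-- the iterative Euclid of A computes B's recursive Bezout coefficients
theorem modInvLoop_eq_bezout : ∀ (b a s os : Int),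
    modInvLoop b a s os = os * (bezout a b).1 + s * (bezout a b).2 := by
  intro b a s os
  induction a, b using bezout.induct generalizing s os with
  | case1 a =>
    rw [modInvLoop, bezout]; simp
  | case2 a b hb ih =>
    rw [modInvLoop, bezout]
    simp only [hb, dite_false]
    have harg : a - PySem.Int.floordiv a b * b = PySem.Int.mod a b := by
      have := PySem.Int.floordiv_mul_add_mod a b; omega
    rw [harg, ih]
    ring

theorem modInverse_eq (a n : Int) : modInverse a n = modInverseB a n := by
  unfold modInverse modInverseB
  rw [modInvLoop_eq_bezout]
  ring_nf

-- composition of affine maps (p ∘ q as x ↦ p.1*(q.1*x+q.2)+p.2)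
def affComp (p q : Int × Int) : Int × Int := (p.1 * q.1, p.1 * q.2 + p.2)

theorem affComp_assoc (p q r : Int × Int) :
    affComp (affComp p q) r = affComp p (affComp q r) := by
  simp [affComp]; constructor <;> ring

theorem affComp_one (p : Int × Int) : affComp p (1, 0) = p := by
  simp [affComp]

theorem stepA_eq (n : Int) (st : Int × Int) (c : String × Int) :
    stepA n st c = affComp (affB n c) st := by
  unfold stepA affB affComp
  rcases c with ⟨k, v⟩
  by_cases h1 : k = "deal into new stack"
  · subst h1; refine Prod.ext ?_ ?_ <;> simp <;> ring
  · by_cases h2 : k = "cut"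
    · subst h2; simp
    · by_cases h3 : k = "deal with increment"
      · subst h3; refine Prod.ext ?_ ?_ <;> simp [modInverse_eq] <;> ring
      · simp only [h1, h2, h3, if_false]
        split
        next heq => simp_all
        next heq => simp_all
        next heq => simp_all
        next => simp

theorem key (n : Int) (l : List (String × Int)) : ∀ e : Int × Int,
    l.foldl (fun st command =>
      let p := affB n command
      (st.1 * p.1, st.1 * p.2 + st.2)) e
      = affComp e (l.reverse.foldl (stepA n) (1, 0)) := by
  induction l with
  | nil => intro e; simp [affComp_one]
  | cons c l ih =>
    intro e
    simp only [List.foldl_cons, List.reverse_cons, List.foldl_append, List.foldl_cons,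
      List.foldl_nil]
    rw [ih, stepA_eq]
    have : (let p := affB n c; ((e.1 * p.1, e.1 * p.2 + e.2) : Int × Int)) = affComp e (affB n c) := by
      simp [affComp]
    rw [this, affComp_assoc]

theorem states_eq (n : Int) (l : List (String × Int)) :
    l.reverse.foldl (stepA n) (1, 0)
      = l.foldl (fun st command =>
          let p := affB n command
          (st.1 * p.1, st.1 * p.2 + st.2)) (1, 0) := by
  rw [key]
  unfold affComp
  simp

-- ===== VERDICT (by name: the statement is the Claim_ definition above) =====
theorem flattened_spec : Claim_equal_flattened := by
  intro commands n _ _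
  unfold Spec_flattened flattened flattened_alt
  rw [states_eq]
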